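-- pv_equiv track=rewrite | github.com/nomadkaraoke/python-lyrics-transcriber | lyrics_transcriber/correction/strategy_diff.py | _find_unmatched_pairs
-- ===== SOURCE A (Python) =====
-- from typing import Any, Dict, List, Optional, Set, Tuple
--
-- def _find_unmatched_pairs(alignments: List[Tuple[str, str]]) -> List[Tuple[str, str]]:
--     """Find potential corrections from unmatched words."""
--     source_words = [a[0] for a in alignments if a[0] is not None]
--     target_words = [a[1] for a in alignments if a[1] is not None]
--
--     # Find words that appear in one text but not the other
--     source_only = set(source_words) - set(target_words)
--     target_only = set(target_words) - set(source_words)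
--
--     # Try to pair unmatched words based on position
--     pairs = []
--     for s_word in source_only:
--         s_indices = [i for i, (w, _) in enumerate(alignments) if w == s_word]
--         for s_idx in s_indices:
--             # Look for nearby unmatched target words
--             for t_word in target_only:
--                 t_indices = [i for i, (_, w) in enumerate(alignments) if w == t_word]
--                 for t_idx in t_indices:
--                     if abs(s_idx - t_idx) <= 2:  # Allow for small position differences
--                         pairs.append((s_word, t_word))
--                         break
--
--     return pairs
-- ===== SOURCE B (Python) =====
-- from typing import List, Tuple
--
-- def _find_unmatched_pairs(alignments: List[Tuple[str, str]]) -> List[Tuple[str, str]]: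
--     """Find potential corrections from unmatched words."""
--     source_words = [a[0] for a in alignments if a[0] is not None]
--     target_words = [a[1] for a in alignments if a[1] is not None]
--
--     source_only = set(source_words) - set(target_words)
--     target_only = set(target_words) - set(source_words)
--
--     # Precompute, in one pass each, every word's positions: an ordered index
--     # list per source word, and an index set per target word for O(1) lookups.
--     s_positions = {}
--     for i, (s_w, _t_w) in enumerate(alignments):
--         s_positions.setdefault(s_w, []).append(i)
--     t_positions = {}
--     for i, (_s_w, t_w) in enumerate(alignments):
--         t_positions.setdefault(t_w, set()).add(i)
--
--     pairs = []
--     for s_word in source_only: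
--         for s_idx in s_positions[s_word]:
--             for t_word in target_only:
--                 t_set = t_positions[t_word]
--                 if any(s_idx + d in t_set for d in (-2, -1, 0, 1, 2)):
--                     pairs.append((s_word, t_word))
--     return pairs
-- ===== Notes on version B (the rewrite author's own statement) =====
-- stated objective: faster
-- what changed: Instead of rescanning the full alignment list inside the nested loops to rebuild s_indices/t_indices for every word, B builds a position list per source word and a position set per target word in one pass each, and replaces the inner break-scan by an O(1) five-offset set-membership existence test.
import Mathlib
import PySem

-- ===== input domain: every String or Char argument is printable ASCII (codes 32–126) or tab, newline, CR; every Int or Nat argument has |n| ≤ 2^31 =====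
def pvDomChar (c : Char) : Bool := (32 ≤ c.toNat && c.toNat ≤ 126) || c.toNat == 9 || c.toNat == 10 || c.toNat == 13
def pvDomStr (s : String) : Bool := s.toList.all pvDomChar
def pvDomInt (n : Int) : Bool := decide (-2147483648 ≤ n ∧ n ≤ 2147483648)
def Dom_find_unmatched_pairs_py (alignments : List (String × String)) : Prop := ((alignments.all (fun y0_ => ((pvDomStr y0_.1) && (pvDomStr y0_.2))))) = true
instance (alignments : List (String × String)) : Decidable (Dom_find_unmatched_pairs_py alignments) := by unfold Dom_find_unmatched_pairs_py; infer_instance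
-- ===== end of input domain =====

-- B replaces A's repeated rescans of `alignments` (rebuilding s_indices/t_indices inside the
-- loops) by two index maps built once, with an O(1) five-offset set-membership test for
-- "some t_idx within distance 2"; same pairs, in the same order.

-- ===== PORT A =====
-- [i for i, (w, _) in enumerate(alignments) if w == s_word]
def pvA_sIndices (alignments : List (String × String)) (s_word : String) : List Int :=
  (PySem.List.enumerate alignments 0).foldl
    (fun acc iw => if iw.2.1 == s_word then acc ++ [iw.1] else acc) []

-- [i for i, (_, w) in enumerate(alignments) if w == t_word]
def pvA_tIndices (alignments : List (String × String)) (t_word : String) : List Int :=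
  (PySem.List.enumerate alignments 0).foldl
    (fun acc iw => if iw.2.2 == t_word then acc ++ [iw.1] else acc) []

-- 'for t_idx in t_indices: if abs(s_idx - t_idx) <= 2: pairs.append(...); break'
def pvA_scanT (s_word t_word : String) (s_idx : Int)
    (pairs : List (String × String)) : List Int → List (String × String)
  | [] => pairs
  | t_idx :: rest =>
    if |s_idx - t_idx| ≤ 2 then pairs ++ [(s_word, t_word)]
    else pvA_scanT s_word t_word s_idx pairs rest

def find_unmatched_pairs_py (alignments : List (String × String)) : List (String × String) :=
  -- the comprehension filters 'if a[0] is not None' / 'if a[1] is not None' are vacuous here: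
  -- the elements are str, never None
  let source_words := alignments.map (fun a => a.1)
  let target_words := alignments.map (fun a => a.2)
  let source_only := PySem.Set.diff (PySem.Set.ofList source_words) (PySem.Set.ofList target_words)
  let target_only := PySem.Set.diff (PySem.Set.ofList target_words) (PySem.Set.ofList source_words)
  source_only.foldl (fun pairs s_word =>
    (pvA_sIndices alignments s_word).foldl (fun pairs s_idx =>
      target_only.foldl (fun pairs t_word =>
        pvA_scanT s_word t_word s_idx pairs (pvA_tIndices alignments t_word)) pairs) pairs) []

-- ===== PORT B =====
-- for i, (s_w, _t_w) in enumerate(alignments): s_positions.setdefault(s_w, []).append(i)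
def pvB_sPositions (alignments : List (String × String)) : PySem.Dict String (List Int) :=
  (PySem.List.enumerate alignments 0).foldl
    (fun d iw => d.modify iw.2.1 [] (fun l => l ++ [iw.1])) PySem.Dict.empty

-- for i, (_s_w, t_w) in enumerate(alignments): t_positions.setdefault(t_w, set()).add(i)
def pvB_tPositions (alignments : List (String × String)) : PySem.Dict String (PySem.Set Int) :=
  (PySem.List.enumerate alignments 0).foldl
    (fun d iw => d.modify iw.2.2 PySem.Set.empty (fun s => PySem.Set.add s iw.1)) PySem.Dict.empty

def find_unmatched_pairs_py_alt (alignments : List (String × String)) : List (String × String) :=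
  let source_words := alignments.map (fun a => a.1)
  let target_words := alignments.map (fun a => a.2)
  let source_only := PySem.Set.diff (PySem.Set.ofList source_words) (PySem.Set.ofList target_words)
  let target_only := PySem.Set.diff (PySem.Set.ofList target_words) (PySem.Set.ofList source_words)
  let s_positions := pvB_sPositions alignments
  let t_positions := pvB_tPositions alignments
  source_only.foldl (fun pairs s_word =>
    (s_positions.getD s_word []).foldl (fun pairs s_idx =>
      target_only.foldl (fun pairs t_word =>
        -- 't_positions[t_word]': every t_word in target_only has an entry, so getD is exact here
        let t_set := t_positions.getD t_word PySem.Set.empty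
        if [(-2 : Int), -1, 0, 1, 2].any (fun d => PySem.Set.contains t_set (s_idx + d))
        then pairs ++ [(s_word, t_word)]
        else pairs) pairs) pairs) []

-- ===== PRECONDITION & SPEC =====
def Spec_find_unmatched_pairs_py (alignments : List (String × String)) (out : List (String × String)) : Prop := out = find_unmatched_pairs_py_alt alignments
instance (alignments : List (String × String)) (out : List (String × String)) : Decidable (Spec_find_unmatched_pairs_py alignments out) := by unfold Spec_find_unmatched_pairs_py; infer_instance

-- ===== CLAIM (what is proved, stated in full; the proofs are below) =====
def Claim_equal_find_unmatched_pairs_py : Prop := ∀ (alignments : List (String × String)), Dom_find_unmatched_pairs_py alignments → Spec_find_unmatched_pairs_py alignments (find_unmatched_pairs_py alignments)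

-- ===== LEMMAS AND PROOFS =====

-- B's s_positions lookup gives exactly A's s_indices comprehension, for every word.
-- fold invariant for B's grouping loop (lists)
theorem pv_modify_append_getD (l : List (Int × (String × String)))
    (d : PySem.Dict String (List Int)) (w : String) :
    (l.foldl (fun d iw => d.modify iw.2.1 [] (fun v => v ++ [iw.1])) d).getD w [] =
      d.getD w [] ++ (l.filter (fun iw => iw.2.1 == w)).map (fun iw => iw.1) := by
  induction l generalizing d with
  | nil => simp
  | cons iw rest ih =>
    rw [List.foldl_cons, ih, PySem.Dict.getD_modify, List.filter_cons]
    by_cases h : iw.2.1 = w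
    · simp [h]
    · simp [h, Ne.symm h]

theorem pv_sPositions_getD (alignments : List (String × String)) (w : String) :
    (pvB_sPositions alignments).getD w [] = pvA_sIndices alignments w := by
  unfold pvB_sPositions pvA_sIndices
  rw [pv_modify_append_getD, PySem.List.foldl_append_if]
  simp

-- membership in B's t_positions set = membership in A's t_indices list
-- fold invariant for B's grouping loop (index sets): membership only
theorem pv_modify_add_mem (l : List (Int × (String × String)))
    (d : PySem.Dict String (PySem.Set Int)) (w : String) (x : Int) :
    x ∈ (l.foldl (fun d iw => d.modify iw.2.2 PySem.Set.empty (fun s => PySem.Set.add s iw.1)) d).getD w PySem.Set.empty ↔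
      x ∈ d.getD w PySem.Set.empty ∨ x ∈ (l.filter (fun iw => iw.2.2 == w)).map (fun iw => iw.1) := by
  induction l generalizing d with
  | nil => simp
  | cons iw rest ih =>
    rw [List.foldl_cons, ih, PySem.Dict.getD_modify, List.filter_cons]
    by_cases h : iw.2.2 = w
    · simp [h, PySem.Set.mem_add]
      tauto
    · simp [h, Ne.symm h]

theorem pv_tPositions_mem (alignments : List (String × String)) (w : String) (x : Int) :
    x ∈ (pvB_tPositions alignments).getD w PySem.Set.empty ↔ x ∈ pvA_tIndices alignments w := by
  unfold pvB_tPositions pvA_tIndices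
  rw [pv_modify_add_mem, PySem.List.foldl_append_if]
  simp [PySem.Set.empty]

-- A's break-scan appends the pair iff some index of the list is within distance 2
theorem pv_scanT_eq (s_word t_word : String) (s_idx : Int)
    (pairs : List (String × String)) (tl : List Int) :
    pvA_scanT s_word t_word s_idx pairs tl =
      if tl.any (fun t_idx => decide (|s_idx - t_idx| ≤ 2)) then pairs ++ [(s_word, t_word)]
      else pairs := by
  induction tl with
  | nil => simp [pvA_scanT]
  | cons t rest ih =>
    by_cases h : |s_idx - t| ≤ 2
    · simp [pvA_scanT, h]
    · simp only [pvA_scanT, if_neg h, ih, List.any_cons]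
      simp [h]

-- the five-offset membership test decides the same existence condition
theorem pv_offsets_eq (s_idx : Int) (tl : List Int) (ts : PySem.Set Int)
    (h : ∀ x, x ∈ ts ↔ x ∈ tl) :
    ([(-2 : Int), -1, 0, 1, 2].any (fun d => PySem.Set.contains ts (s_idx + d))) =
      (tl.any (fun t_idx => decide (|s_idx - t_idx| ≤ 2))) := by
  rw [Bool.eq_iff_iff]
  simp only [List.any_eq_true, PySem.Set.contains, List.contains_iff_mem, decide_eq_true_eq, h]
  constructor
  · rintro ⟨d, hd, hmem⟩
    refine ⟨s_idx + d, hmem, ?_⟩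
    simp only [List.mem_cons, List.not_mem_nil, or_false] at hd
    rcases hd with h1 | h1 | h1 | h1 | h1 <;> subst h1 <;> simp
  · rintro ⟨t, ht, habs⟩
    rw [abs_le] at habs
    refine ⟨t - s_idx, ?_, by simpa using ht⟩
    simp only [List.mem_cons, List.not_mem_nil, or_false]
    omega

-- ===== VERDICT (by name: the statement is the Claim_ definition above) =====
theorem find_unmatched_pairs_py_spec : Claim_equal_find_unmatched_pairs_py := by
  intro alignments _
  unfold Spec_find_unmatched_pairs_py find_unmatched_pairs_py find_unmatched_pairs_py_alt
  apply PySem.List.foldl_congr_mem'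
  intro s_word _ pairs
  rw [pv_sPositions_getD]
  apply PySem.List.foldl_congr_mem'
  intro s_idx _ pairs
  apply PySem.List.foldl_congr_mem'
  intro t_word _ pairs
  rw [pv_scanT_eq, ← pv_offsets_eq s_idx (pvA_tIndices alignments t_word)
        ((pvB_tPositions alignments).getD t_word PySem.Set.empty)
        (fun x => pv_tPositions_mem alignments t_word x)]
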